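-- pv_equiv track=rewrite | github.com/ericmerle3789/Collatz-Junction-Theorem | scripts/tools/session10f22_iter3_rebels.py | Q_pred
-- ===== SOURCE A (Python) =====
-- def Q_pred(d):
--     n = d - 1; Q = 1
--     for p in [2, 3, 5, 7, 11, 13, 17, 19, 23, 29, 31, 37, 41, 43, 47]:
--         if n % p == 0:
--             max_power = 0; temp_n = n
--             while temp_n % p == 0: max_power += 1; temp_n //= p
--             for e in range(1, max_power + 1):
--                 if pow(2, n // (p**e), d) == 1: Q *= p
--                 else: break
--     return Q
-- ===== SOURCE B (Python) =====
-- def Q_pred(d):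
--     # The test pow(2, n // p**e, d) == 1 is downward-closed in e (because
--     # n // p**(e-1) = p * (n // p**e) while p**e divides n, and x ≡ 1 implies
--     # x**p ≡ 1), so instead of scanning exponents one by one we binary-search
--     # the largest satisfying exponent and multiply Q by p**lo in one shot.
--     n = d - 1
--     Q = 1
--     for p in [2, 3, 5, 7, 11, 13, 17, 19, 23, 29, 31, 37, 41, 43, 47]:
--         if n % p == 0:
--             v = 0
--             t = n
--             while t % p == 0:
--                 v += 1
--                 t //= p
--             lo, hi = 0, v
--             while lo < hi:
--                 mid = (lo + hi + 1) // 2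
--                 if pow(2, n // p**mid, d) == 1:
--                     lo = mid
--                 else:
--                     hi = mid - 1
--             Q *= p ** lo
--     return Q
-- ===== Notes on version B (the rewrite author's own statement) =====
-- stated objective: alternative
-- what changed: Instead of A's linear scan over exponents e=1..v with one Q*=p per success and a break at the first failure, B exploits that the test pow(2, n//p**e, d)==1 is downward-closed in e and binary-searches the largest satisfying exponent lo in [0,v], multiplying Q by p**lo once.
-- outside the precondition, e.g. on Q_pred(-6): A raises ValueError, B raises ValueError
import Mathlib
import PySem

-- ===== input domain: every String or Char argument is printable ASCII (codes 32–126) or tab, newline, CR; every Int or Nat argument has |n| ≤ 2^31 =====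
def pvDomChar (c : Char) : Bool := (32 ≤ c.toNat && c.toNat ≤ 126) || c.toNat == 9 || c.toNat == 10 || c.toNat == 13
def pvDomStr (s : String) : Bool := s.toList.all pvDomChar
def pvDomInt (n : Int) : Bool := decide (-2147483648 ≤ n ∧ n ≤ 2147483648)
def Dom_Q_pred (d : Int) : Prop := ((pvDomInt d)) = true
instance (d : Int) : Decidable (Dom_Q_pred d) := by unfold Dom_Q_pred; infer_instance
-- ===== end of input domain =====

-- B replaces A's linear exponent scan (one Q *= p per success, break on failure) by a
-- binary search for the largest exponent e ≤ v_p(d-1) with 2^((d-1)//p^e) ≡ 1 (mod d)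
-- — valid because that test is downward-closed in e — and multiplies Q by p^e once.

-- shared helper: Python's built-in three-argument pow(2, e, d), square-and-multiply
-- (exact for d ≠ 0, including Python's negative-exponent modular inverse — the base 2
-- is invertible mod |d| exactly when |d| is odd, the only case Pre_ admits — and
-- Python's sign rule: the result takes the sign of the modulus)
def pvPowMod (b : Int) (e : Nat) (m : Int) : Int :=
  if h : e = 0 then 1 % m
  else if e % 2 = 1 then pvPowMod (b * b % m) (e / 2) m * b % m
  else pvPowMod (b * b % m) (e / 2) m
decreasing_by all_goals exact Nat.div_lt_self (Nat.pos_of_ne_zero h) (by norm_num)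

def pvPow2aux (e d : Int) : Int :=
  if 0 ≤ e then pvPowMod 2 e.toNat (d.natAbs : Int)
  else pvPowMod (((d.natAbs : Int) + 1) / 2) (-e).toNat (d.natAbs : Int)

def pvPow2 (e d : Int) : Int :=
  if d < 0 ∧ pvPow2aux e d ≠ 0 then pvPow2aux e d - (d.natAbs : Int) else pvPow2aux e d

def pvPrimes : List Int := [2, 3, 5, 7, 11, 13, 17, 19, 23, 29, 31, 37, 41, 43, 47]

-- the 'while temp_n % p == 0' valuation loop (identical in both Pythons), fuelled
-- (Python diverges when temp_n is zero, i.e. d = 1, which Pre_ excludes); returns (count, temp_n)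
def pvValLoop (p : Int) : Nat → Int → Int → Int × Int
  | 0, cnt, temp => (cnt, temp)
  | f + 1, cnt, temp =>
    if PySem.Int.mod temp p = 0 then pvValLoop p f (cnt + 1) (PySem.Int.floordiv temp p)
    else (cnt, temp)

-- ===== PORT A =====
-- the 'for e in range(1, max_power + 1)' loop with its break
def pvInnerA (n d p : Int) : List Int → Int → Int
  | [], Q => Q
  | e :: es, Q =>
    if pvPow2 (PySem.Int.floordiv n (p ^ e.toNat)) d = 1 then pvInnerA n d p es (Q * p)
    else Q

def pvStepA (n d Q p : Int) : Int :=
  if PySem.Int.mod n p = 0 then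
    pvInnerA n d p (PySem.List.pyRange 1 ((pvValLoop p (n.natAbs + 1) 0 n).1 + 1) 1) Q
  else Q

def Q_pred (d : Int) : Int := pvPrimes.foldl (fun Q p => pvStepA (d - 1) d Q p) 1

-- ===== PORT B =====
-- the 'while lo < hi' binary-search loop, fuelled (hi - lo shrinks every iteration)
def pvBSLoop (n d p : Int) : Nat → Int → Int → Int
  | 0, lo, _ => lo
  | f + 1, lo, hi =>
    if lo < hi then
      if pvPow2 (PySem.Int.floordiv n (p ^ (PySem.Int.floordiv (lo + hi + 1) 2).toNat)) d = 1
      then pvBSLoop n d p f (PySem.Int.floordiv (lo + hi + 1) 2) hi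
      else pvBSLoop n d p f lo (PySem.Int.floordiv (lo + hi + 1) 2 - 1)
    else lo

def pvStepB (n d Q p : Int) : Int :=
  if PySem.Int.mod n p = 0 then
    Q * p ^ (pvBSLoop n d p ((pvValLoop p (n.natAbs + 1) 0 n).1.toNat + 1) 0
              (pvValLoop p (n.natAbs + 1) 0 n).1).toNat
  else Q

def Q_pred_alt (d : Int) : Int := pvPrimes.foldl (fun Q p => pvStepB (d - 1) d Q p) 1

-- ===== PRECONDITION & SPEC =====
-- Exactly the inputs on which the Python A returns: A diverges at d = 1 (the valuation
-- loop on a zero value never ends) and raises ValueError for negative even d whose n = d - 1 has a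
-- listed odd prime factor (pow with a negative exponent modulo an even number).
def Pre_Q_pred (d : Int) : Prop :=
  d ≠ 1 ∧ (1 ≤ d ∨ PySem.Int.mod d 2 = 1 ∨
    ∀ p ∈ ([3, 5, 7, 11, 13, 17, 19, 23, 29, 31, 37, 41, 43, 47] : List Int),
      PySem.Int.mod (d - 1) p ≠ 0)
instance (d : Int) : Decidable (Pre_Q_pred d) := by unfold Pre_Q_pred; infer_instance

def pvWitness_Q_pred : Int := (7)

def Spec_Q_pred (d : Int) (out : Int) : Prop := out = Q_pred_alt d
instance (d : Int) (out : Int) : Decidable (Spec_Q_pred d out) := by unfold Spec_Q_pred; infer_instance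

-- ===== CLAIM (what is proved, stated in full; the proofs are below) =====
def Claim_equal_Q_pred : Prop := ∀ (d : Int), Dom_Q_pred d → Pre_Q_pred d → Spec_Q_pred d (Q_pred d)

-- ===== LEMMAS AND PROOFS =====

-- the per-exponent test both programs make, as a predicate on the exponent
def Pb (n d p : Int) (e : Nat) : Bool :=
  decide (pvPow2 (PySem.Int.floordiv n (p ^ e)) d = 1)

-- proof-side reference loop: v congruence-test steps on the running quotient
def pvGLoop (d p : Int) : Nat → Int → Int → Int
  | 0, _, Q => Q
  | v + 1, m, Q =>
    if pvPow2 (PySem.Int.floordiv m p) d = 1 then pvGLoop d p v (PySem.Int.floordiv m p) (Q * p)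
    else Q

-- proof-side valuation with fuel
def pvValN (p : Int) : Nat → Int → Nat
  | 0, _ => 0
  | f + 1, m => if PySem.Int.mod m p = 0 then pvValN p f (PySem.Int.floordiv m p) + 1 else 0

-- length of the initial run of true values of P starting at i, capped at r
def pvRun (P : Nat → Bool) : Nat → Nat → Nat
  | _, 0 => 0
  | i, r + 1 => if P i then pvRun P (i + 1) r + 1 else 0

theorem pvValLoop_fst (p : Int) (f : Nat) : ∀ (cnt temp : Int),
    (pvValLoop p f cnt temp).1 = cnt + (pvValN p f temp : Int) := by
  induction f with
  | zero => intro cnt temp; simp [pvValLoop, pvValN]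
  | succ f ih =>
    intro cnt temp
    simp only [pvValLoop, pvValN]
    split
    · rw [ih]; push_cast; ring
    · simp

theorem pv_mod_dvd {m p : Int} (h : PySem.Int.mod m p = 0) : p ∣ m :=
  (PySem.Int.mod_eq_zero_iff_dvd m p).mp h

theorem pv_floordiv_exact {m p : Int} (hp : 0 < p) (h : p ∣ m) :
    p * PySem.Int.floordiv m p = m := by
  rw [PySem.Int.floordiv_eq_ediv_of_pos hp]
  exact Int.mul_ediv_cancel' h

-- floor division composes for positive divisors
theorem pv_floordiv_floordiv (n a b : Int) (ha : 0 ≤ a) (hb : 0 ≤ b) :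
    PySem.Int.floordiv (PySem.Int.floordiv n a) b = PySem.Int.floordiv n (a * b) := by
  simp only [PySem.Int.floordiv]
  exact Int.fdiv_fdiv_eq_fdiv_mul n ha hb

-- A's range scan computes the reference loop
theorem pvInnerA_eq_gLoop (n d p : Int) (hp : 2 ≤ p) :
    ∀ (v k : Nat) (Q : Int),
      pvInnerA n d p (PySem.List.pyRange ((k : Int) + 1) ((k : Int) + (v : Int) + 1) 1) Q
        = pvGLoop d p v (PySem.Int.floordiv n (p ^ k)) Q := by
  intro v
  induction v with
  | zero =>
    intro k Q
    rw [PySem.List.pyRange_one_eq_nil (by push_cast; omega)]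
    rfl
  | succ v ih =>
    intro k Q
    rw [PySem.List.pyRange_one_cons (by push_cast; omega)]
    simp only [pvInnerA, pvGLoop]
    have hexp : ((k : Int) + 1).toNat = k + 1 := by omega
    have hdiv : PySem.Int.floordiv (PySem.Int.floordiv n (p ^ k)) p
        = PySem.Int.floordiv n (p ^ (k + 1)) := by
      rw [pv_floordiv_floordiv n (p ^ k) p (by positivity) (by omega), ← pow_succ]
    rw [hexp, hdiv]
    split
    · have := ih (k + 1) (Q * p)
      push_cast at this ⊢
      convert this using 3
      all_goals omega
    · rfl

-- the reference loop multiplies Q by p once per element of the initial true run of Pb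
theorem pvGLoop_run (n d p : Int) (hp : 2 ≤ p) :
    ∀ (v k : Nat) (Q : Int),
      pvGLoop d p v (PySem.Int.floordiv n (p ^ k)) Q = Q * p ^ pvRun (Pb n d p) (k + 1) v := by
  intro v
  induction v with
  | zero => intro k Q; simp [pvGLoop, pvRun]
  | succ v ih =>
    intro k Q
    simp only [pvGLoop, pvRun]
    have hdiv : PySem.Int.floordiv (PySem.Int.floordiv n (p ^ k)) p
        = PySem.Int.floordiv n (p ^ (k + 1)) := by
      rw [pv_floordiv_floordiv n (p ^ k) p (by positivity) (by omega), ← pow_succ]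
    rw [hdiv]
    by_cases h : pvPow2 (PySem.Int.floordiv n (p ^ (k + 1))) d = 1
    · have hb : Pb n d p (k + 1) = true := by simp [Pb, h]
      rw [if_pos h, hb, if_pos rfl, ih (k + 1) (Q * p), pow_succ]
      ring
    · have hb : Pb n d p (k + 1) = false := by simp [Pb, h]
      rw [if_neg h, hb]
      simp

-- basic run properties
theorem pvRun_le (P : Nat → Bool) : ∀ (r i : Nat), pvRun P i r ≤ r := by
  intro r
  induction r with
  | zero => intro i; simp [pvRun]
  | succ r ih =>
    intro i
    simp only [pvRun]
    split
    · exact Nat.succ_le_succ (ih (i + 1))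
    · exact Nat.zero_le _

theorem pvRun_true (P : Nat → Bool) : ∀ (r i j : Nat), i ≤ j → j < i + pvRun P i r → P j = true := by
  intro r
  induction r with
  | zero => intro i j h1 h2; exfalso; simp [pvRun] at h2; omega
  | succ r ih =>
    intro i j h1 h2
    simp only [pvRun] at h2
    by_cases hp : P i
    · rw [if_pos hp] at h2
      rcases Nat.eq_or_lt_of_le h1 with rfl | hlt
      · exact hp
      · exact ih (i + 1) j hlt (by omega)
    · rw [if_neg hp] at h2; exfalso; omega

theorem pvRun_stop (P : Nat → Bool) : ∀ (r i : Nat), pvRun P i r < r → P (i + pvRun P i r) = false := by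
  intro r
  induction r with
  | zero => intro i h; exfalso; omega
  | succ r ih =>
    intro i h
    simp only [pvRun] at h ⊢
    by_cases hp : P i
    · rw [if_pos hp] at h ⊢
      have := ih (i + 1) (by omega)
      rw [show i + (pvRun P (i + 1) r + 1) = (i + 1) + pvRun P (i + 1) r by omega]
      exact this
    · rw [if_neg hp]; simpa using hp

-- fuelled valuation really divides: every exponent up to it divides n
theorem pvValN_dvd (p : Int) (hp : 0 < p) :
    ∀ (f : Nat) (n : Int) (e : Nat), e ≤ pvValN p f n → p ^ e ∣ n := by
  intro f
  induction f with
  | zero => intro n e h; simp [pvValN] at h; subst h; simp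
  | succ f ih =>
    intro n e h
    simp only [pvValN] at h
    by_cases hm : PySem.Int.mod n p = 0
    · rw [if_pos hm] at h
      cases e with
      | zero => simp
      | succ e =>
        obtain ⟨q, hq⟩ := ih (PySem.Int.floordiv n p) e (by omega)
        refine ⟨q, ?_⟩
        calc n = p * PySem.Int.floordiv n p := (pv_floordiv_exact hp (pv_mod_dvd hm)).symm
          _ = p * (p ^ e * q) := by rw [hq]
          _ = p ^ (e + 1) * q := by ring
    · rw [if_neg hm] at h; interval_cases e; simp

-- pvPowMod stays in [0, m) for m > 0
theorem pvPowMod_bounds (m : Int) (hm : 0 < m) :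
    ∀ (e : Nat) (b : Int), 0 ≤ pvPowMod b e m ∧ pvPowMod b e m < m := by
  intro e
  induction e using Nat.strong_induction_on with
  | _ e ih =>
    intro b
    unfold pvPowMod
    split
    · exact ⟨Int.emod_nonneg 1 (by omega), Int.emod_lt_of_pos 1 hm⟩
    · rename_i he
      split
      · exact ⟨Int.emod_nonneg _ (by omega), Int.emod_lt_of_pos _ hm⟩
      · exact ih (e / 2) (Nat.div_lt_self (Nat.pos_of_ne_zero he) (by norm_num)) _

-- reduce the base modulo m inside a power
theorem pv_pow_emod (a m : Int) (k : Nat) : (a % m) ^ k % m = a ^ k % m := by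
  induction k with
  | zero => simp
  | succ k ih =>
    rw [pow_succ, pow_succ, Int.mul_emod, ih, Int.emod_emod_of_dvd _ dvd_rfl, ← Int.mul_emod]

-- pvPowMod computes modular exponentiation
theorem pvPowMod_correct (m : Int) :
    ∀ (e : Nat) (b : Int), pvPowMod b e m = b ^ e % m := by
  intro e
  induction e using Nat.strong_induction_on with
  | _ e ih =>
    intro b
    unfold pvPowMod
    split
    · rename_i he; subst he; simp
    · rename_i he
      have hrec : pvPowMod (b * b % m) (e / 2) m = b ^ (2 * (e / 2)) % m := by
        rw [ih (e / 2) (Nat.div_lt_self (Nat.pos_of_ne_zero he) (by norm_num)) (b * b % m),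
          pv_pow_emod, pow_mul, sq]
      split
      · rename_i hodd
        rw [hrec, Int.mul_emod, Int.emod_emod_of_dvd _ dvd_rfl, ← Int.mul_emod, ← pow_succ]
        have h2 : 2 * (e / 2) + 1 = e := by omega
        rw [h2]
      · rename_i hodd
        rw [hrec]
        have h2 : 2 * (e / 2) = e := by omega
        rw [h2]

-- Python pow(2, e, d) for d ≥ 1 and e ≥ 0 is plain modular exponentiation
theorem pvPow2_eq (e d : Int) (hd : 0 < d) (he : 0 ≤ e) :
    pvPow2 e d = 2 ^ e.toNat % d := by
  have hm : ((d.natAbs : Int)) = d := by omega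
  unfold pvPow2 pvPow2aux
  rw [hm, if_pos he, if_neg (fun hcon => absurd hcon.1 (by omega))]
  exact pvPowMod_correct d e.toNat 2

-- Python pow(2, e, d) for d < 0 is never positive (it takes the sign of d)
theorem pvPow2_nonpos (e d : Int) (hd : d < 0) : pvPow2 e d ≤ 0 := by
  have hm : (0 : Int) < (d.natAbs : Int) := by omega
  have hb : 0 ≤ pvPow2aux e d ∧ pvPow2aux e d < (d.natAbs : Int) := by
    unfold pvPow2aux
    split
    · exact pvPowMod_bounds _ hm _ _
    · exact pvPowMod_bounds _ hm _ _
  unfold pvPow2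
  split
  · omega
  · rename_i h
    have h0 : pvPow2aux e d = 0 := by
      by_contra hne
      exact h ⟨hd, hne⟩
    omega

-- downward closure of the test: Pb (e+1) → Pb e, for d ≥ 2 and e below the valuation
theorem pv_dc (d p : Int) (hp : 2 ≤ p) (hd : 2 ≤ d) :
    ∀ (e : Nat), e + 1 ≤ pvValN p ((d - 1).natAbs + 1) (d - 1) →
      Pb (d - 1) d p (e + 1) = true → Pb (d - 1) d p e = true := by
  intro e hle htrue
  set n := d - 1 with hn
  have hn0 : (0 : Int) < n := by omega
  obtain ⟨q, hq⟩ := pvValN_dvd p (by omega) ((d - 1).natAbs + 1) n (e + 1) hle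
  have hppow : (0 : Int) < p ^ (e + 1) := by positivity
  have hq0 : 0 ≤ q := by nlinarith
  have hqe1 : PySem.Int.floordiv n (p ^ (e + 1)) = q := by
    rw [PySem.Int.floordiv_eq_ediv_of_pos hppow, hq]
    exact Int.mul_ediv_cancel_left q (by positivity)
  have hqe : PySem.Int.floordiv n (p ^ e) = p * q := by
    have hpe : (0 : Int) < p ^ e := by positivity
    rw [PySem.Int.floordiv_eq_ediv_of_pos hpe,
      show n = p ^ e * (p * q) by rw [hq]; ring]
    exact Int.mul_ediv_cancel_left _ (by positivity)
  simp only [Pb, decide_eq_true_eq] at htrue ⊢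
  rw [hqe1, pvPow2_eq q d (by omega) hq0] at htrue
  rw [hqe, pvPow2_eq (p * q) d (by omega) (mul_nonneg (by omega) hq0)]
  have hpn : (0 : Int) ≤ p := by omega
  have htn : (p * q).toNat = q.toNat * p.toNat := by
    have h1 := Int.toNat_of_nonneg hq0
    have h2 := Int.toNat_of_nonneg hpn
    have h3 := Int.toNat_of_nonneg (mul_nonneg hpn hq0)
    have : ((p * q).toNat : Int) = ((q.toNat * p.toNat : Nat) : Int) := by
      push_cast
      rw [h1, h2, h3]
      ring
    exact_mod_cast this
  calc 2 ^ (p * q).toNat % d = (2 ^ q.toNat) ^ p.toNat % d := by rw [htn, pow_mul]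
    _ = (2 ^ q.toNat % d) ^ p.toNat % d := (pv_pow_emod _ _ _).symm
    _ = 1 ^ p.toNat % d := by rw [htrue]
    _ = 1 % d := by rw [one_pow]
    _ = 1 := Int.emod_eq_of_lt (by omega) (by omega)

-- upward propagation of failure under downward closure
theorem pv_false_up (n d p : Int) (v : Nat)
    (dc : ∀ (e : Nat), e + 1 ≤ v → Pb n d p (e + 1) = true → Pb n d p e = true)
    (e0 : Nat) (h0 : Pb n d p e0 = false) :
    ∀ (e : Nat), e0 ≤ e → e ≤ v → Pb n d p e = false := by
  intro e
  induction e with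
  | zero =>
    intro h1 _
    have : e0 = 0 := by omega
    subst this
    exact h0
  | succ e ih =>
    intro h1 h2
    rcases Nat.eq_or_lt_of_le h1 with rfl | hlt
    · exact h0
    · have he : Pb n d p e = false := ih (by omega) (by omega)
      by_contra hc
      have ht : Pb n d p (e + 1) = true := by
        cases hPb : Pb n d p (e + 1)
        · exact absurd hPb hc
        · rfl
      exact absurd (dc e h2 ht) (by simp [he])

-- binary-search correctness: the result is the (unique) maximal satisfied exponent
theorem pvBSLoop_spec (n d p : Int) (v : Int) (hv : 0 ≤ v)
    (dc : ∀ (e : Nat), (e : Int) + 1 ≤ v → Pb n d p (e + 1) = true → Pb n d p e = true) :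
    ∀ (f : Nat) (lo hi : Int), 0 ≤ lo → lo ≤ hi → hi ≤ v → hi - lo < (f : Int) →
      (lo = 0 ∨ Pb n d p lo.toNat = true) →
      (∀ (e : Nat), hi < (e : Int) → (e : Int) ≤ v → Pb n d p e = false) →
      0 ≤ pvBSLoop n d p f lo hi ∧ pvBSLoop n d p f lo hi ≤ v ∧
      (pvBSLoop n d p f lo hi = 0 ∨ Pb n d p (pvBSLoop n d p f lo hi).toNat = true) ∧
      (∀ (e : Nat), pvBSLoop n d p f lo hi < (e : Int) → (e : Int) ≤ v → Pb n d p e = false) := by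
  intro f
  induction f with
  | zero => intro lo hi h1 h2 h3 h4 _ _; exfalso; simp at h4; omega
  | succ f ih =>
    intro lo hi h1 h2 h3 h4 hinv htop
    simp only [pvBSLoop]
    by_cases hlt : lo < hi
    · rw [if_pos hlt]
      have hmid : PySem.Int.floordiv (lo + hi + 1) 2 = (lo + hi + 1) / 2 :=
        PySem.Int.floordiv_eq_ediv_of_pos (by omega)
      have hb1 : lo + 1 ≤ PySem.Int.floordiv (lo + hi + 1) 2 := by rw [hmid]; omega
      have hb2 : PySem.Int.floordiv (lo + hi + 1) 2 ≤ hi := by rw [hmid]; omega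
      by_cases htest :
          pvPow2 (PySem.Int.floordiv n (p ^ (PySem.Int.floordiv (lo + hi + 1) 2).toNat)) d = 1
      · rw [if_pos htest]
        refine ih (PySem.Int.floordiv (lo + hi + 1) 2) hi (by omega) (by omega) h3 (by push_cast at h4 ⊢; omega)
          (Or.inr (decide_eq_true htest)) htop
      · rw [if_neg htest]
        have hmidfalse : Pb n d p (PySem.Int.floordiv (lo + hi + 1) 2).toNat = false :=
          decide_eq_false htest
        refine ih lo (PySem.Int.floordiv (lo + hi + 1) 2 - 1) h1 (by omega) (by omega)
          (by push_cast at h4 ⊢; omega) hinv ?_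
        intro e he hev
        exact pv_false_up n d p v.toNat
          (fun e0 h0 ht => dc e0 (by omega) ht)
          (PySem.Int.floordiv (lo + hi + 1) 2).toNat hmidfalse e (by omega) (by omega)
    · rw [if_neg hlt]
      have : lo = hi := by omega
      subst this
      exact ⟨h1, h3, hinv, htop⟩

-- per-prime step equality
theorem pvStep_eq (n d p : Int) (hp : 2 ≤ p)
    (dc : ∀ (e : Nat), e + 1 ≤ pvValN p (n.natAbs + 1) n →
      Pb n d p (e + 1) = true → Pb n d p e = true)
    (Q : Int) : pvStepB n d Q p = pvStepA n d Q p := by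
  by_cases hmod : PySem.Int.mod n p = 0
  · unfold pvStepA pvStepB
    rw [if_pos hmod, if_pos hmod, pvValLoop_fst]
    simp only [zero_add, Int.toNat_natCast]
    set vN := pvValN p (n.natAbs + 1) n with hvN
    -- A side equals Q * p ^ (initial run length)
    have hA : pvInnerA n d p (PySem.List.pyRange 1 ((vN : Int) + 1) 1) Q
        = Q * p ^ pvRun (Pb n d p) 1 vN := by
      have h0 := pvInnerA_eq_gLoop n d p hp vN 0 Q
      simp only [Nat.cast_zero, zero_add] at h0
      rw [h0]
      have h1 := pvGLoop_run n d p hp vN 0 Q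
      simpa using h1
    rw [hA]
    -- B side: the binary search returns the same run length
    have hB := pvBSLoop_spec n d p (vN : Int) (by positivity)
      (fun e he ht => dc e (by exact_mod_cast he) ht)
      (vN + 1) 0 (vN : Int) le_rfl (by positivity) le_rfl (by push_cast; omega)
      (Or.inl rfl) (fun e he hev => absurd (he.trans_le hev) (lt_irrefl _))
    obtain ⟨hr0, hrv, hrinv, hrtop⟩ := hB
    set r := pvBSLoop n d p (vN + 1) 0 (vN : Int) with hrdef
    have hc := pvRun_le (Pb n d p) vN 1
    set c := pvRun (Pb n d p) 1 vN with hcdef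
    have hrc : r.toNat = c := by
      by_contra hne
      rcases Nat.lt_or_ge r.toNat c with hlt | hge
      · have htrue : Pb n d p (r.toNat + 1) = true :=
          pvRun_true (Pb n d p) vN 1 (r.toNat + 1) (by omega) (by omega)
        have hfalse : Pb n d p (r.toNat + 1) = false :=
          hrtop (r.toNat + 1) (by push_cast; omega) (by push_cast; omega)
        simp [htrue] at hfalse
      · have hgt : c < r.toNat := by omega
        have htrue : Pb n d p r.toNat = true := by
          rcases hrinv with h | h
          · exfalso; omega
          · exact h
        have hfalse : Pb n d p r.toNat = false := by
          rcases Nat.lt_or_ge c vN with hcv | hcv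
          · have hstop : Pb n d p (1 + c) = false := pvRun_stop (Pb n d p) vN 1 hcv
            exact pv_false_up n d p vN (fun e0 h0 ht => dc e0 h0 ht)
              (1 + c) hstop r.toNat (by omega) (by omega)
          · exfalso; omega
        simp [htrue] at hfalse
    rw [hrc]
  · unfold pvStepA pvStepB
    rw [if_neg hmod, if_neg hmod]

-- d = 0 never reaches a pow call: no listed prime divides -1
theorem pv_d0 : ∀ p ∈ pvPrimes, pvValN p 2 (-1) = 0 := by decide

theorem pvPrimes_ge2 : ∀ p ∈ pvPrimes, 2 ≤ p := by decide

-- ===== VERDICT (by name: the statement is the Claim_ definition above) =====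
theorem Q_pred_spec : Claim_equal_Q_pred := by
  intro d _ hpre
  unfold Spec_Q_pred Q_pred Q_pred_alt
  refine (PySem.List.foldl_congr_mem _ _ _ _ ?_).symm
  intro Q p hmem
  have hp : 2 ≤ p := pvPrimes_ge2 p hmem
  have dc : ∀ (e : Nat), e + 1 ≤ pvValN p ((d - 1).natAbs + 1) (d - 1) →
      Pb (d - 1) d p (e + 1) = true → Pb (d - 1) d p e = true := by
    rcases lt_trichotomy d 0 with hd | hd | hd
    · intro e _ htrue
      exfalso
      have hle := pvPow2_nonpos (PySem.Int.floordiv (d - 1) (p ^ (e + 1))) d hd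
      simp only [Pb, decide_eq_true_eq] at htrue
      omega
    · subst hd
      intro e hle
      rw [show ((0 : Int) - 1) = -1 by norm_num] at hle
      rw [show ((-1 : Int)).natAbs + 1 = 2 by decide] at hle
      rw [pv_d0 p hmem] at hle
      omega
    · have hd2 : 2 ≤ d := by
        rcases hpre with ⟨h1, _⟩
        omega
      exact pv_dc d p hp hd2
  exact pvStep_eq (d - 1) d p hp dc Q
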